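-- pv_equiv track=rewrite | github.com/AlexandrServal/it-nation-intro | it_nation_intro/is_special_number.py | is_special_number
-- ===== SOURCE A (Python) =====
-- def is_special_number(number: int) -> str:
--     # write your code here
--     massiv = []
--     while number > 0:
--         massiv.append(number % 10)
--         number //= 10
--     massiv.reverse()
--     a= 'Special!!'
--     i = 0
--     for i in range(0, len(massiv)):
--         if massiv[i]<=5:
--             a = 'Special!!'
--         elif massiv[i]>5:
--             a = 'NOT!!'
--             break
--     return a
--     pass
-- ===== SOURCE B (Python) =====
-- def is_special_number(number: int) -> str:
--     while number > 0:
--         if number % 10 > 5: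
--             return 'NOT!!'
--         number //= 10
--     return 'Special!!'
-- ===== Notes on version B (the rewrite author's own statement) =====
-- stated objective: simpler
-- what changed: B tests each digit during the extraction loop and returns early, instead of building a digit list, reversing it and scanning it with a flag variable.
import Mathlib
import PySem

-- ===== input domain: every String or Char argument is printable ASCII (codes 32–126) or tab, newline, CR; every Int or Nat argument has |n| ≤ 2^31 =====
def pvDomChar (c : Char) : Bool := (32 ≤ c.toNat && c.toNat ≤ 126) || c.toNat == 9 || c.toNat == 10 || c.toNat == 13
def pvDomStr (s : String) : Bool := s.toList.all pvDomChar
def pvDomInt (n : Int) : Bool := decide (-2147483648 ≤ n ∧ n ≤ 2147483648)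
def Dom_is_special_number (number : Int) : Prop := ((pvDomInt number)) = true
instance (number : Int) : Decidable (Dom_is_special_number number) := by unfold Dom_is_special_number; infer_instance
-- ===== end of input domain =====

-- B changes the decomposition: one early-return digit loop instead of build-list, reverse, then flag-scan ('simpler').

-- termination helper for both loops (cited by decreasing_by)
theorem pvFloordiv10_toNat_lt (n : Int) (h : 0 < n) :
    (PySem.Int.floordiv n 10).toNat < n.toNat := by
  rw [PySem.Int.floordiv_eq_ediv_of_pos (by omega)]
  omega

-- ===== PORT A =====
-- the 'while number > 0' digit-extraction loop of A (appends number % 10, then number //= 10)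
def pvDigitsA (number : Int) (massiv : List Int) : List Int :=
  if h : 0 < number then
    pvDigitsA (PySem.Int.floordiv number 10) (massiv ++ [PySem.Int.mod number 10])
  else massiv
termination_by number.toNat
decreasing_by exact pvFloordiv10_toNat_lt number h

-- A's 'for i in range(0, len(massiv))' scan with the flag a and break
def pvScanA : List Int → String → String
  | [], a => a
  | d :: rest, a =>
    if d ≤ 5 then pvScanA rest "Special!!"
    else if d > 5 then "NOT!!"
    else pvScanA rest a

def is_special_number (number : Int) : String :=
  let massiv := (pvDigitsA number []).reverse
  pvScanA massiv "Special!!"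

-- ===== PORT B =====
def is_special_number_alt (number : Int) : String :=
  if h : 0 < number then
    if PySem.Int.mod number 10 > 5 then "NOT!!"
    else is_special_number_alt (PySem.Int.floordiv number 10)
  else "Special!!"
termination_by number.toNat
decreasing_by exact pvFloordiv10_toNat_lt number h

-- ===== PRECONDITION & SPEC =====
def Spec_is_special_number (number : Int) (out : String) : Prop := out = is_special_number_alt number
instance (number : Int) (out : String) : Decidable (Spec_is_special_number number out) := by unfold Spec_is_special_number; infer_instance

-- ===== CLAIM (what is proved, stated in full; the proofs are below) =====
def Claim_equal_is_special_number : Prop := ∀ (number : Int), Dom_is_special_number number → Spec_is_special_number number (is_special_number number)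

-- ===== LEMMAS AND PROOFS =====

-- A's digit loop as an accumulator-prefix
theorem pvDigitsA_acc (number : Int) (massiv : List Int) :
    pvDigitsA number massiv = massiv ++ pvDigitsA number [] := by
  by_cases hn : 0 < number
  · conv_lhs => rw [pvDigitsA]
    conv_rhs => rw [pvDigitsA]
    simp only [hn, dite_true]
    rw [pvDigitsA_acc (PySem.Int.floordiv number 10) (massiv ++ [PySem.Int.mod number 10]),
        pvDigitsA_acc (PySem.Int.floordiv number 10) ([] ++ [PySem.Int.mod number 10])]
    simp
  · conv_lhs => rw [pvDigitsA]
    conv_rhs => rw [pvDigitsA]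
    simp [hn]
termination_by number.toNat
decreasing_by all_goals exact pvFloordiv10_toNat_lt _ hn

-- A's scan with the constant flag is 'any digit > 5'
theorem pvScanA_char (l : List Int) :
    pvScanA l "Special!!" = if l.any (fun d => decide (d > 5)) then "NOT!!" else "Special!!" := by
  induction l with
  | nil => simp [pvScanA]
  | cons d rest ih =>
      by_cases h : d ≤ 5
      · simp [pvScanA, h, ih, show ¬ d > 5 by omega]
      · simp [pvScanA, h, show d > 5 by omega]

-- B equals the same 'any digit > 5' characterisation, on A's digit list
theorem pvAlt_char (number : Int) :
    is_special_number_alt number =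
      if (pvDigitsA number []).any (fun d => decide (d > 5)) then "NOT!!" else "Special!!" := by
  induction number using is_special_number_alt.induct with
  | case1 n hn hd =>
      rw [is_special_number_alt, pvDigitsA]
      simp only [hn, dite_true, hd, if_true]
      rw [pvDigitsA_acc (PySem.Int.floordiv n 10) ([] ++ [PySem.Int.mod n 10])]
      rw [PySem.Int.mod_eq_emod_of_pos (by omega)] at hd
      simp
      intro h; omega
  | case2 n hn hd ih =>
      rw [is_special_number_alt, pvDigitsA]
      simp only [hn, dite_true, hd, if_false]
      rw [ih, pvDigitsA_acc (PySem.Int.floordiv n 10) ([] ++ [PySem.Int.mod n 10])]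
      rw [PySem.Int.mod_eq_emod_of_pos (by omega)] at hd
      simp [hd]
  | case3 n hn =>
      rw [is_special_number_alt, pvDigitsA]
      simp [hn]

-- ===== VERDICT (by name: the statement is the Claim_ definition above) =====
theorem is_special_number_spec : Claim_equal_is_special_number := by
  intro number _
  unfold Spec_is_special_number is_special_number
  rw [pvScanA_char, pvAlt_char]
  simp [List.any_reverse]
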